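-- pv_equiv track=rewrite | github.com/jinyun1tang/EcoSIM | python_tools/dcreader.py | getvarls
-- ===== SOURCE A (Python) =====
-- def ischar(c):
--     """
--     determine if c is a legitimate
--     """
--     if c=='_' or c=='[' or c==']' or c=='.' or c=='/' or c=='+':
--         return True
--     if ord(c)>=ord('0') and ord(c)<=ord('9'):
--         return True
--     if ord(c)>=ord('a') and ord(c)<=ord('z'):
--         return True
--     if ord(c)>=ord('A') and ord(c)<=ord('Z'):
--         return True
--     return False
--
-- def getvarls(tline):
--     """
--     get list of variables
--     """
--     docp=False
--     v=''
--     vl=[]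
--     nvar=0
--     for c in tline:
--         if ischar(c):
--             if not docp:
--                 docp=True
--             v=v+c
--         else:
--             if docp:
--                 vl.append(v)
--                 docp=False
--                 v=''
--                 nvar=nvar+1
--     if v:
--         vl.append(v)
--         nvar=nvar+1
--     return vl,nvar
-- ===== SOURCE B (Python) =====
-- def _legal(c):
--     return ('A' <= c <= 'Z') or ('a' <= c <= 'z') or ('0' <= c <= '9') or c in '_[]./+'
--
-- def getvarls(tline):
--     """
--     get list of variables
--     """
--     vl = []
--     i = 0
--     n = len(tline)
--     while i < n:
--         if _legal(tline[i]):
--             j = i + 1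
--             while j < n and _legal(tline[j]):
--                 j += 1
--             vl.append(tline[i:j])
--             i = j
--         else:
--             i += 1
--     return vl, len(vl)
-- ===== Notes on version B (the rewrite author's own statement) =====
-- stated objective: alternative
-- what changed: Replaces the per-character state machine (docp flag, character-by-character token buffer v=v+c, separate nvar counter) by a two-pointer scan that slices each maximal run of legal characters out of the string directly and returns len(vl) for nvar.
import Mathlib
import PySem

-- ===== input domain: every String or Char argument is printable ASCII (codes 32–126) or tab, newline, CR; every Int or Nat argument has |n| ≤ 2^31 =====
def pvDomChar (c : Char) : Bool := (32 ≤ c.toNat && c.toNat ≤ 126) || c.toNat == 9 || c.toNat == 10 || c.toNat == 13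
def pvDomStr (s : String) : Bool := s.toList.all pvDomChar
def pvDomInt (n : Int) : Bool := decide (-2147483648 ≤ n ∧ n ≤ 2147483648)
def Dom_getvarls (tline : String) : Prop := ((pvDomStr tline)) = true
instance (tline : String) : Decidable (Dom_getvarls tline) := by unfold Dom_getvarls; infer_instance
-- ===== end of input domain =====

-- B replaces A's per-character state machine by a two-pointer scan slicing
-- maximal runs of legal characters (objective: alternative; same cost).

-- ===== PORT A =====
-- port of ischar: the same tests in the same order (ord → Char.toNat)
def ischarA (c : Char) : Bool :=
  if c = '_' || c = '[' || c = ']' || c = '.' || c = '/' || c = '+' then true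
  else if '0'.toNat ≤ c.toNat && c.toNat ≤ '9'.toNat then true
  else if 'a'.toNat ≤ c.toNat && c.toNat ≤ 'z'.toNat then true
  else if 'A'.toNat ≤ c.toNat && c.toNat ≤ 'Z'.toNat then true
  else false

-- the for-loop of A as structural recursion over the same state (docp, v, vl, nvar)
def getvarlsLoop : List Char → Bool → List Char → List (List Char) → Int →
    Bool × List Char × List (List Char) × Int
  | [], docp, v, vl, nvar => (docp, v, vl, nvar)
  | c :: cs, docp, v, vl, nvar =>
    if ischarA c then
      getvarlsLoop cs true (v ++ [c]) vl nvar
    else if docp then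
      getvarlsLoop cs false [] (vl ++ [v]) (nvar + 1)
    else
      getvarlsLoop cs docp v vl nvar

def getvarls (tline : String) : List String × Int :=
  let r := getvarlsLoop tline.toList false [] [] 0
  let v := r.2.1
  let vl := r.2.2.1
  let nvar := r.2.2.2
  if v ≠ [] then ((vl ++ [v]).map String.ofList, nvar + 1)
  else (vl.map String.ofList, nvar)

-- ===== PORT B =====
-- port of _legal: range tests plus membership in '_[]./+'
def legalB (c : Char) : Bool :=
  ('A' ≤ c && c ≤ 'Z') || ('a' ≤ c && c ≤ 'z') || ('0' ≤ c && c ≤ '9') ||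
  ['_', '[', ']', '.', '/', '+'].contains c

-- the two-pointer scan of Source B: skip an illegal char, or slice the maximal
-- legal run (takeWhile = the inner while loop advancing j) and continue after it
def tokensB : List Char → List (List Char)
  | [] => []
  | c :: cs =>
    if legalB c then (c :: cs.takeWhile legalB) :: tokensB (cs.dropWhile legalB)
    else tokensB cs
  termination_by cs => cs.length
  decreasing_by
    · exact Nat.lt_succ_of_le (List.length_dropWhile_le _ _)
    · exact Nat.lt_succ_self _

def getvarls_alt (tline : String) : List String × Int :=
  let vl := (tokensB tline.toList).map String.ofList
  (vl, (vl.length : Int))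

-- ===== PRECONDITION & SPEC =====
def Spec_getvarls (tline : String) (out : List String × Int) : Prop := out = getvarls_alt tline
instance (tline : String) (out : List String × Int) : Decidable (Spec_getvarls tline out) := by unfold Spec_getvarls; infer_instance

-- ===== CLAIM (what is proved, stated in full; the proofs are below) =====
def Claim_equal_getvarls : Prop := ∀ (tline : String), Dom_getvarls tline → Spec_getvarls tline (getvarls tline)

-- ===== LEMMAS AND PROOFS =====

-- the two legality predicates agree on every character
theorem char_eq_iff (c d : Char) : (c = d) ↔ (c.toNat = d.toNat) := by
  constructor
  · rintro rfl; rfl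
  · intro h; apply Char.ext; exact UInt32.toNat_inj.mp h

theorem ischarA_eq_legalB (c : Char) : ischarA c = legalB c := by
  have hle : ∀ a b : Char, (a ≤ b) ↔ (a.toNat ≤ b.toNat) := fun a b => by
    rw [Char.le_def, UInt32.le_iff_toNat_le]; rfl
  rw [Bool.eq_iff_iff]
  simp only [ischarA, legalB, Bool.or_eq_true, Bool.and_eq_true, decide_eq_true_eq,
    List.contains_eq_mem, List.mem_cons, List.not_mem_nil, or_false]
  simp only [char_eq_iff, hle]
  split_ifs with h1 h2 h3 h4 <;> simp_all <;> omega

-- tokenization with a pending (possibly empty) token, the abstract shape of A's loop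
def tokA : List Char → List Char → List (List Char)
  | v, [] => if v = [] then [] else [v]
  | v, c :: cs =>
    if ischarA c then tokA (v ++ [c]) cs
    else if v = [] then tokA [] cs else v :: tokA [] cs
  termination_by _ cs => cs.length

theorem tokA_eq_tokensB (cs : List Char) :
    (∀ v : List Char, v ≠ [] →
      tokA v cs = (v ++ cs.takeWhile legalB) :: tokensB (cs.dropWhile legalB)) ∧
    tokA [] cs = tokensB cs := by
  induction cs with
  | nil => exact ⟨fun v hv => by simp [tokA, tokensB, hv], by simp [tokA, tokensB]⟩
  | cons c cs ih =>
    have hch := ischarA_eq_legalB c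
    constructor
    · intro v hv
      by_cases h : legalB c
      · rw [tokA]
        simp only [hch, h, if_pos, List.takeWhile_cons_of_pos h, List.dropWhile_cons_of_pos h]
        rw [(ih.1 (v ++ [c]) (by simp))]
        simp
      · rw [tokA]
        simp only [hch, h, Bool.false_eq_true, if_false, hv, ih.2]
        rw [List.takeWhile_cons_of_neg (by simpa using h),
            List.dropWhile_cons_of_neg (by simpa using h)]
        rw [tokensB]
        simp [h]
    · by_cases h : legalB c
      · rw [tokA, tokensB]
        simp only [hch, h, if_pos, List.nil_append]
        rw [ih.1 [c] (by simp)]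
        simp
      · rw [tokA, tokensB]
        simp [hch, h, ih.2]

-- the finalization A performs after its loop
def finA (r : Bool × List Char × List (List Char) × Int) : List (List Char) × Int :=
  if r.2.1 ≠ [] then (r.2.2.1 ++ [r.2.1], r.2.2.2 + 1) else (r.2.2.1, r.2.2.2)

theorem loop_spec (cs : List Char) : ∀ (v : List Char) (vl : List (List Char)) (nvar : Int),
    nvar = (vl.length : Int) →
    finA (getvarlsLoop cs (!v.isEmpty) v vl nvar) =
      (vl ++ tokA v cs, ((vl ++ tokA v cs).length : Int)) := by
  induction cs with
  | nil =>
    intro v vl nvar hn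
    by_cases hv : v = []
    · subst hv; simp [getvarlsLoop, finA, tokA, hn]
    · simp [getvarlsLoop, finA, tokA, hv, hn]
  | cons c cs ih =>
    intro v vl nvar hn
    by_cases h : ischarA c
    · have h1 : (true : Bool) = (!(v ++ [c]).isEmpty) := by simp
      rw [getvarlsLoop]
      simp only [h, if_pos]
      rw [h1, ih (v ++ [c]) vl nvar hn]
      rw [tokA]; simp [h]
    · by_cases hv : v = []
      · subst hv
        rw [getvarlsLoop]
        simp only [h, Bool.false_eq_true, if_false, List.isEmpty_nil, Bool.not_true]
        have hh := ih [] vl nvar hn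
        simp only [List.isEmpty_nil, Bool.not_true] at hh
        rw [hh]
        rw [tokA]; simp [h]
      · have h1 : (!v.isEmpty) = true := by simp [hv]
        rw [getvarlsLoop]
        simp only [h, Bool.false_eq_true, if_false, h1, if_pos]
        have h2 : (false : Bool) = (!([] : List Char).isEmpty) := by simp
        rw [h2, ih [] (vl ++ [v]) (nvar + 1) (by simp [hn])]
        rw [tokA]; simp [h, hv]

-- ===== VERDICT (by name: the statement is the Claim_ definition above) =====
theorem getvarls_spec : Claim_equal_getvarls := by
  intro tline _
  unfold Spec_getvarls getvarls getvarls_alt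
  have h0 : (false : Bool) = (!([] : List Char).isEmpty) := by simp
  have h := loop_spec tline.toList [] [] 0 (by simp)
  rw [← h0] at h
  have hT := (tokA_eq_tokensB tline.toList).2
  rcases hr : getvarlsLoop tline.toList false [] [] 0 with ⟨d, v, vl, nvar⟩
  rw [hr] at h
  simp only [finA, List.nil_append, hT] at h
  by_cases hv : v = []
  · simp only [hv, ne_eq, not_true_eq_false, if_false] at h ⊢
    simp [Prod.ext_iff] at h
    simp [h.1, h.2]
  · simp only [ne_eq, hv, not_false_eq_true, if_true] at h ⊢
    simp [Prod.ext_iff] at h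
    simp [h.1, h.2]
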